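-- pv_equiv track=rewrite | github.com/hhxxwwestrella/symusic | phrase2context_clip_new.py | _token_budget_batches
-- ===== SOURCE A (Python) =====
-- def _token_budget_batches(token_lens, budget: int):
--     """Yield (start, end) ranges of indices so that sum(token_lens[start:end]) <= budget."""
--     n = len(token_lens)
--     i = 0
--     while i < n:
--         acc = 0
--         j = i
--         while j < n and acc + token_lens[j] <= budget:
--             acc += token_lens[j]
--             j += 1
--         if j == i:  # single huge item; ensure forward progress
--             j += 1
--         yield i, j
--         i = j
-- ===== SOURCE B (Python) =====
-- def _token_budget_batches(token_lens, budget: int):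
--     """Yield (start, end) ranges of indices so that sum(token_lens[start:end]) <= budget."""
--     n = len(token_lens)
--     start = 0
--     acc = 0
--     for idx in range(n):
--         t = token_lens[idx]
--         if acc + t <= budget:
--             acc += t
--         elif t > budget:
--             # item oversized even alone: close the open batch, then a singleton
--             if start < idx:
--                 yield start, idx
--             yield idx, idx + 1
--             start = idx + 1
--             acc = 0
--         else:
--             yield start, idx
--             start = idx
--             acc = t
--     if start < n:
--         yield start, n
-- ===== Notes on version B (the rewrite author's own statement) =====
-- stated objective: simpler
-- what changed: Replaced A's nested while loops (outer loop restarting an inner accumulation scan for each batch) by a single flat for-loop that carries the open batch (start, acc) as running state, yielding a batch whenever the next item no longer fits and handling the oversized-singleton case inline.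
import Mathlib
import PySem

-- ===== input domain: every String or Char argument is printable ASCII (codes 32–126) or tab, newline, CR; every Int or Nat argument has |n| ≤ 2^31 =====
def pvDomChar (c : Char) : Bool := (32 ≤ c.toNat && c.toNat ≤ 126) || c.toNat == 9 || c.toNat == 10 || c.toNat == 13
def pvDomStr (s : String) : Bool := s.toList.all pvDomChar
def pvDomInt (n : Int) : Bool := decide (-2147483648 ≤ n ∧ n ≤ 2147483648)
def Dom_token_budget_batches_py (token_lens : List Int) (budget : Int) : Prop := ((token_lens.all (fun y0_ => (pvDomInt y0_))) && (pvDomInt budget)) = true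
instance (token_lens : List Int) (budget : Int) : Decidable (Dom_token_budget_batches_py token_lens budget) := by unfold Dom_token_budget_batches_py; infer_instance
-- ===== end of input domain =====

-- B replaces A's nested while loops by one flat linear pass carrying the open batch (start, acc) as state; same cost, flatter control flow.
-- ===== PORT A =====
-- inner while: `while j < n and acc + token_lens[j] <= budget: acc += token_lens[j]; j += 1`
-- (structural recursion on a fuel counter only to make the while loop total; fuel n - j always suffices;
--  j stays inside [0, n), so List.getD j 0 is exactly Python's token_lens[j])
def tbbA_innerF (token_lens : List Int) (budget : Int) (n : Nat) : Nat → Int → Nat → Nat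
  | 0, _, j => j
  | fuel + 1, acc, j =>
    if j < n then
      if acc + token_lens.getD j 0 ≤ budget then
        tbbA_innerF token_lens budget n fuel (acc + token_lens.getD j 0) (j + 1)
      else j
    else j

def tbbA_inner (token_lens : List Int) (budget : Int) (n : Nat) (acc : Int) (j : Nat) : Nat :=
  tbbA_innerF token_lens budget n (n - j) acc j

-- outer while: `while i < n: acc = 0; j = i; <inner>; if j == i: j += 1; yield i, j; i = j`
-- (again total via a fuel counter; fuel n - i always suffices since i strictly increases)
def tbbA_outerF (token_lens : List Int) (budget : Int) (n : Nat) : Nat → Nat → List (Int × Int)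
  | 0, _ => []
  | fuel + 1, i =>
    if i < n then
      let j := tbbA_inner token_lens budget n 0 i
      let j' := if j = i then j + 1 else j
      ((i : Int), (j' : Int)) :: tbbA_outerF token_lens budget n fuel j'
    else []

def tbbA_outer (token_lens : List Int) (budget : Int) (n : Nat) (i : Nat) : List (Int × Int) :=
  tbbA_outerF token_lens budget n (n - i) i

def token_budget_batches_py (token_lens : List Int) (budget : Int) : List (Int × Int) :=
  tbbA_outer token_lens budget token_lens.length 0

-- ===== PORT B =====
-- the `for idx in range(n)` loop of Source B, walking the remaining suffix `ts` with counter `idx`;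
-- on [] the trailing `if start < n: yield start, n` flush
def tbbB_go (budget : Int) (n : Nat) (start : Nat) (acc : Int) (idx : Nat) (ts : List Int) : List (Int × Int) :=
  match ts with
  | [] => if start < n then [((start : Int), (n : Int))] else []
  | t :: rest =>
    if acc + t ≤ budget then
      tbbB_go budget n start (acc + t) (idx + 1) rest
    else if t > budget then
      (if start < idx then [((start : Int), (idx : Int))] else []) ++
        ((idx : Int), (idx : Int) + 1) :: tbbB_go budget n (idx + 1) 0 (idx + 1) rest
    else
      ((start : Int), (idx : Int)) :: tbbB_go budget n idx t (idx + 1) rest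

def token_budget_batches_py_alt (token_lens : List Int) (budget : Int) : List (Int × Int) :=
  tbbB_go budget token_lens.length 0 0 0 token_lens

-- ===== PRECONDITION & SPEC =====
def Spec_token_budget_batches_py (token_lens : List Int) (budget : Int) (out : List (Int × Int)) : Prop := out = token_budget_batches_py_alt token_lens budget
instance (token_lens : List Int) (budget : Int) (out : List (Int × Int)) : Decidable (Spec_token_budget_batches_py token_lens budget out) := by unfold Spec_token_budget_batches_py; infer_instance

-- ===== CLAIM (what is proved, stated in full; the proofs are below) =====
def Claim_equal_token_budget_batches_py : Prop := ∀ (token_lens : List Int) (budget : Int), Dom_token_budget_batches_py token_lens budget → Spec_token_budget_batches_py token_lens budget (token_budget_batches_py token_lens budget)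

-- ===== LEMMAS AND PROOFS =====

-- the inner while loop, seen with any sufficient fuel, computes the same index
theorem tbbA_innerF_irrel (token_lens : List Int) (budget : Int) (n : Nat) :
    ∀ (f1 f2 : Nat) (acc : Int) (j : Nat), n ≤ f1 + j → n ≤ f2 + j →
      tbbA_innerF token_lens budget n f1 acc j = tbbA_innerF token_lens budget n f2 acc j := by
  intro f1
  induction f1 with
  | zero =>
    intro f2 acc j h1 h2
    cases f2 with
    | zero => rfl
    | succ f2' => rw [tbbA_innerF, tbbA_innerF, if_neg (by omega)]
  | succ f1' ih =>
    intro f2 acc j h1 h2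
    by_cases hj : j < n
    · cases f2 with
      | zero => omega
      | succ f2' =>
        rw [tbbA_innerF, tbbA_innerF, if_pos hj, if_pos hj]
        by_cases hc : acc + token_lens.getD j 0 ≤ budget
        · rw [if_pos hc, if_pos hc, ih f2' _ (j + 1) (by omega) (by omega)]
        · rw [if_neg hc, if_neg hc]
    · cases f2 with
      | zero => rw [tbbA_innerF, tbbA_innerF, if_neg hj]
      | succ f2' => rw [tbbA_innerF, tbbA_innerF, if_neg hj, if_neg hj]

-- the inner while loop, as the unfolding of A's source line
theorem tbbA_inner_unfold (token_lens : List Int) (budget : Int) (n : Nat) (acc : Int) (j : Nat) :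
    tbbA_inner token_lens budget n acc j =
      if j < n then
        if acc + token_lens.getD j 0 ≤ budget then
          tbbA_inner token_lens budget n (acc + token_lens.getD j 0) (j + 1)
        else j
      else j := by
  unfold tbbA_inner
  by_cases hj : j < n
  · have hf : n - j = (n - j - 1) + 1 := by omega
    rw [hf, tbbA_innerF, if_pos hj, if_pos hj]
    by_cases hc : acc + token_lens.getD j 0 ≤ budget
    · rw [if_pos hc, if_pos hc,
        tbbA_innerF_irrel token_lens budget n (n - j - 1) (n - (j + 1)) _ (j + 1) (by omega) (by omega)]
    · rw [if_neg hc, if_neg hc]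
  · cases hnj : n - j with
    | zero => rw [tbbA_innerF, if_neg hj]
    | succ f => rw [tbbA_innerF, if_neg hj, if_neg hj]

-- the inner loop never moves j backwards
theorem tbbA_innerF_ge (token_lens : List Int) (budget : Int) (n : Nat) :
    ∀ (fuel : Nat) (acc : Int) (j : Nat), j ≤ tbbA_innerF token_lens budget n fuel acc j := by
  intro fuel
  induction fuel with
  | zero => intro acc j; rw [tbbA_innerF]
  | succ f ih =>
    intro acc j
    rw [tbbA_innerF]
    split
    · split
      · exact le_trans (Nat.le_succ j) (ih _ (j + 1))
      · exact le_refl j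
    · exact le_refl j

theorem tbbA_inner_ge (token_lens : List Int) (budget : Int) (n : Nat) (acc : Int) (j : Nat) :
    j ≤ tbbA_inner token_lens budget n acc j :=
  tbbA_innerF_ge token_lens budget n (n - j) acc j

-- the outer while loop, seen with any sufficient fuel, yields the same batches
theorem tbbA_outerF_irrel (token_lens : List Int) (budget : Int) (n : Nat) :
    ∀ (f1 f2 i : Nat), n ≤ f1 + i → n ≤ f2 + i →
      tbbA_outerF token_lens budget n f1 i = tbbA_outerF token_lens budget n f2 i := by
  intro f1
  induction f1 with
  | zero =>
    intro f2 i h1 h2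
    cases f2 with
    | zero => rfl
    | succ f2' => rw [tbbA_outerF, tbbA_outerF, if_neg (by omega)]
  | succ f1' ih =>
    intro f2 i h1 h2
    by_cases hi : i < n
    · cases f2 with
      | zero => omega
      | succ f2' =>
        rw [tbbA_outerF, tbbA_outerF, if_pos hi, if_pos hi]
        have hge := tbbA_inner_ge token_lens budget n 0 i
        dsimp only
        congr 1
        apply ih
        · split <;> omega
        · split <;> omega
    · cases f2 with
      | zero => rw [tbbA_outerF, tbbA_outerF, if_neg hi]
      | succ f2' => rw [tbbA_outerF, tbbA_outerF, if_neg hi, if_neg hi]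

-- the outer while loop, as the unfolding of A's source lines
theorem tbbA_outer_unfold (token_lens : List Int) (budget : Int) (n i : Nat) :
    tbbA_outer token_lens budget n i =
      if i < n then
        let j := tbbA_inner token_lens budget n 0 i
        let j' := if j = i then j + 1 else j
        ((i : Int), (j' : Int)) :: tbbA_outer token_lens budget n j'
      else [] := by
  unfold tbbA_outer
  by_cases hi : i < n
  · have hf : n - i = (n - i - 1) + 1 := by omega
    rw [hf, tbbA_outerF, if_pos hi, if_pos hi]
    have hge := tbbA_inner_ge token_lens budget n 0 i
    dsimp only
    congr 1
    apply tbbA_outerF_irrel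
    · split <;> omega
    · split <;> omega
  · cases hni : n - i with
    | zero => rw [tbbA_outerF, if_neg hi]
    | succ f => rw [tbbA_outerF, if_neg hi, if_neg hi]

-- A's outer loop frozen mid-inner-loop: the current batch opened at `start`, the inner scan has
-- reached (acc, idx); finish the inner loop, emit the batch, continue with the outer loop.
def tbbA_mid (token_lens : List Int) (budget : Int) (n start : Nat) (acc : Int) (idx : Nat) : List (Int × Int) :=
  if start < n then
    let j := tbbA_inner token_lens budget n acc idx
    let j' := if j = start then j + 1 else j
    ((start : Int), (j' : Int)) :: tbbA_outer token_lens budget n j'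
  else []

theorem tbbA_outer_eq_mid (token_lens : List Int) (budget : Int) (n s : Nat) :
    tbbA_outer token_lens budget n s = tbbA_mid token_lens budget n s 0 s := by
  rw [tbbA_outer_unfold, tbbA_mid]

theorem tbb_main (token_lens : List Int) (budget : Int) :
    ∀ (ts : List Int) (idx start : Nat) (acc : Int),
      ts = token_lens.drop idx → idx ≤ token_lens.length → start ≤ idx → (start = idx → acc = 0) →
      tbbB_go budget token_lens.length start acc idx ts =
        tbbA_mid token_lens budget token_lens.length start acc idx := by
  intro ts
  induction ts with
  | nil =>
    intro idx start acc hdrop hlen hle h0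
    have hidx : token_lens.length ≤ idx := by
      by_contra h
      have hne : token_lens.drop idx ≠ [] := by
        simp [List.drop_eq_nil_iff]; omega
      exact hne hdrop.symm
    have heq : idx = token_lens.length := by omega
    have hinner : tbbA_inner token_lens budget token_lens.length acc idx = idx := by
      rw [tbbA_inner_unfold, if_neg (by omega)]
    rw [tbbB_go, tbbA_mid]
    by_cases hs : start < token_lens.length
    · have hne2 : idx ≠ start := by omega
      simp only [if_pos hs, hinner, if_neg hne2]
      rw [tbbA_outer_unfold, if_neg (by omega)]
      simp [heq]
    · simp [hs]
  | cons t rest ih =>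
    intro idx start acc hdrop hlen hle h0
    have hidx : idx < token_lens.length := by
      by_contra h
      rw [List.drop_eq_nil_iff.mpr (by omega)] at hdrop
      simp at hdrop
    have hget : token_lens.getD idx 0 = t := by
      have h1 : (token_lens.drop idx)[0]? = some t := by rw [← hdrop]; rfl
      rw [List.getElem?_drop, Nat.add_zero] at h1
      simp [List.getD_eq_getElem?_getD, h1]
    have hrest : rest = token_lens.drop (idx + 1) := by
      have h1 : (token_lens.drop idx).drop 1 = rest := by
        rw [← hdrop]
        rfl
      rw [List.drop_drop] at h1
      rw [← h1]
    rw [tbbB_go]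
    by_cases hb1 : acc + t ≤ budget
    · simp only [if_pos hb1]
      have hin : tbbA_inner token_lens budget token_lens.length acc idx
          = tbbA_inner token_lens budget token_lens.length (acc + t) (idx + 1) := by
        rw [tbbA_inner_unfold, if_pos hidx, hget, if_pos hb1]
      rw [ih (idx + 1) start (acc + t) hrest (by omega) (by omega) (by omega)]
      simp [tbbA_mid, hin]
    · simp only [if_neg hb1]
      have hin : tbbA_inner token_lens budget token_lens.length acc idx = idx := by
        rw [tbbA_inner_unfold, if_pos hidx, hget, if_neg hb1]
      by_cases hb2 : t > budget
      · simp only [if_pos hb2]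
        have houter : tbbA_outer token_lens budget token_lens.length (idx + 1)
            = tbbB_go budget token_lens.length (idx + 1) 0 (idx + 1) rest := by
          rw [tbbA_outer_eq_mid, ih (idx + 1) (idx + 1) 0 hrest (by omega) (le_refl _) (fun _ => rfl)]
        have hin0 : tbbA_inner token_lens budget token_lens.length 0 idx = idx := by
          rw [tbbA_inner_unfold, if_pos hidx, hget, if_neg (by omega)]
        have houteridx : tbbA_outer token_lens budget token_lens.length idx
            = ((idx : Int), (idx : Int) + 1) :: tbbA_outer token_lens budget token_lens.length (idx + 1) := by
          rw [tbbA_outer_unfold, if_pos hidx]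
          simp [hin0]
        by_cases hs : start < idx
        · have hne2 : idx ≠ start := by omega
          simp only [if_pos hs]
          rw [tbbA_mid]
          simp only [if_pos (show start < token_lens.length by omega), hin, if_neg hne2]
          simp [houteridx, houter]
        · have hseq : idx = start := by omega
          simp only [if_neg hs, List.nil_append]
          rw [tbbA_mid]
          simp only [if_pos (show start < token_lens.length by omega), hin, if_pos hseq]
          rw [houter]
          simp [hseq]
      · simp only [if_neg hb2]
        have hs : start < idx := by
          rcases Nat.lt_or_ge start idx with h | h
          · exact h
          · have heq : start = idx := by omega
            have := h0 heq
            omega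
        have hne2 : idx ≠ start := by omega
        rw [tbbA_mid]
        simp only [if_pos (show start < token_lens.length by omega), hin, if_neg hne2]
        congr 1
        rw [tbbA_outer_eq_mid]
        have hin2 : tbbA_inner token_lens budget token_lens.length 0 idx
            = tbbA_inner token_lens budget token_lens.length (0 + t) (idx + 1) := by
          rw [tbbA_inner_unfold, if_pos hidx, hget, if_pos (by omega)]
        rw [ih (idx + 1) idx t hrest (by omega) (by omega) (by omega)]
        simp [tbbA_mid, hin2]

-- ===== VERDICT (by name: the statement is the Claim_ definition above) =====
theorem token_budget_batches_py_spec : Claim_equal_token_budget_batches_py := by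
  intro token_lens budget _hd
  unfold Spec_token_budget_batches_py token_budget_batches_py token_budget_batches_py_alt
  rw [tbbA_outer_eq_mid,
    ← tbb_main token_lens budget token_lens 0 0 0 (by simp) (by omega) (le_refl 0) (fun _ => rfl)]
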